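-- pv_equiv track=rewrite | github.com/xapork/justina | задачи 3/9.py | count_happy_numbers
-- ===== SOURCE A (Python) =====
-- def count_happy_numbers(length):
--     count = 0
--
--     if length % 2 != 0:
--         return 0
--     for num in range(10 ** (length // 2 - 1), 10 ** (length // 2)):
--         left_part = sum(int(digit) for digit in str(num))
--         right_part = sum(int(digit) for digit in str(num * 2))
--
--         if left_part == right_part:
--             count += 1
--
--     return count
-- ===== SOURCE B (Python) =====
-- def count_happy_numbers(length):
--     if length % 2 != 0:
--         return 0
--     k = length // 2
--     # digitsum(n) == digitsum(2*n) holds iff sum over the digits d of n of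
--     # val(d) = (d if d < 5 else d - 9) is zero: doubling turns each digit >= 5
--     # into one carry, and digitsum(2n) = 2*digitsum(n) - 9*carries.
--     # dp[t] = number of strings of j digits (leading zeros allowed) with val-sum t
--     dp = {0: 1}
--     prev = dp[0]
--     for _ in range(k):
--         prev = dp.get(0, 0)
--         ndp = {}
--         for t, c in dp.items():
--             for d in range(10):
--                 v = d if d < 5 else d - 9
--                 ndp[t + v] = ndp.get(t + v, 0) + c
--         dp = ndp
--     # a k-digit number must not start with 0, and val(0) = 0, so the strings
--     # starting with 0 are counted by the (k-1)-digit table value `prev`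
--     return dp.get(0, 0) - prev
-- ===== Notes on version B (the rewrite author's own statement) =====
-- stated objective: faster
-- what changed: Replaces the brute-force scan of all 10^(length/2 - 1)..10^(length/2)-1 numbers (computing two string digit sums each) by a digit DP over a dict of val-sum counts, using digitsum(n)==digitsum(2n) iff sum of (d if d<5 else d-9) over n's digits is 0.
import Mathlib
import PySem

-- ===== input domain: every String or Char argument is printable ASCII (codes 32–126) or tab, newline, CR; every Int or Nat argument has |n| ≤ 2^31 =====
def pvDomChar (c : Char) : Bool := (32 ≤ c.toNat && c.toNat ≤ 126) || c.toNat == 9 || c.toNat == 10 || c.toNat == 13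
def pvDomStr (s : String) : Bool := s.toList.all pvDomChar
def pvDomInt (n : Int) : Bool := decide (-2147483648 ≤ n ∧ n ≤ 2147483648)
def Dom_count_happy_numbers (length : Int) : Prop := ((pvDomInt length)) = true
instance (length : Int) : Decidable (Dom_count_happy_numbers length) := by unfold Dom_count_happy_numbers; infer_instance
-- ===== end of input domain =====

-- B replaces A's brute-force scan over all 10^(length/2 -1)..10^(length/2)-1 numbers by a
-- digit DP over a dict of val-sum counts (digitsum(n)=digitsum(2n) iff the per-digit values
-- d (d<5) / d-9 (d>=5) sum to 0); measured asymptotically faster.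


-- ===== PORT A =====
-- sum(int(digit) for digit in str(num)): (digit.toNat - 48) is int(digit), exact for the
-- decimal digit characters of str(num) with num ≥ 0 (Pre_ keeps every num in the loop ≥ 1).
def pvDigitSumStr (num : Int) : Int :=
  ((PySem.Int.toStr num).toList.map (fun digit => (digit.toNat : Int) - 48)).sum

def count_happy_numbers (length : Int) : Int :=
  if PySem.Int.mod length 2 ≠ 0 then 0
  else
    -- 10 ** (length//2 - 1): `.toNat` on the exponents is exact because Pre_ gives
    -- length ≥ 2 here (for even length < 2 Python's 10**negative is a float and range raises)
    (PySem.List.pyRange (10 ^ (PySem.Int.floordiv length 2 - 1).toNat)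
        (10 ^ (PySem.Int.floordiv length 2).toNat)).foldl
      (fun count num =>
        if pvDigitSumStr num == pvDigitSumStr (num * 2) then count + 1 else count) 0

-- ===== PORT B =====
def count_happy_numbers_alt (length : Int) : Int :=
  if PySem.Int.mod length 2 ≠ 0 then 0
  else
    let k := PySem.Int.floordiv length 2
    let dp0 : PySem.Dict Int Int := PySem.Dict.ofList [(0, 1)]
    let st :=
      (PySem.List.pyRange 0 k).foldl
        (fun st _ =>
          let prev := st.2.getD 0 0
          let ndp :=
            st.2.items.foldl
              (fun ndp tc =>
                (PySem.List.pyRange 0 10).foldl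
                  (fun ndp d =>
                    let v := if d < 5 then d else d - 9
                    ndp.insert (tc.1 + v) (ndp.getD (tc.1 + v) 0 + tc.2))
                  ndp)
              PySem.Dict.empty
          (prev, ndp))
        (dp0.getD 0 0, dp0)
    st.2.getD 0 0 - st.1

-- ===== PRECONDITION & SPEC =====
-- Pre_ excludes even length < 2: there Python A raises TypeError (10 ** negative is a float
-- handed to range); B returns 0 on those inputs.
def Pre_count_happy_numbers (length : Int) : Prop :=
  PySem.Int.mod length 2 ≠ 0 ∨ 2 ≤ length
instance (length : Int) : Decidable (Pre_count_happy_numbers length) := by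
  unfold Pre_count_happy_numbers; infer_instance

def pvWitness_count_happy_numbers : Int := 2

def Spec_count_happy_numbers (length : Int) (out : Int) : Prop :=
  out = count_happy_numbers_alt length
instance (length : Int) (out : Int) : Decidable (Spec_count_happy_numbers length out) := by
  unfold Spec_count_happy_numbers; infer_instance

-- ===== CLAIM (what is proved, stated in full; the proofs are below) =====
def Claim_equal_count_happy_numbers : Prop :=
  ∀ (length : Int), Dom_count_happy_numbers length → Pre_count_happy_numbers length →
    Spec_count_happy_numbers length (count_happy_numbers length)

-- ===== LEMMAS AND PROOFS =====

-- decimal digit sum of n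
def pvDsum (n : Nat) : Nat :=
  if n = 0 then 0 else n % 10 + pvDsum (n / 10)
decreasing_by exact Nat.div_lt_self (Nat.pos_of_ne_zero (by assumption)) (by norm_num)

-- number of digits ≥ 5 of n (the carries produced when doubling n)
def pvCnt5 (n : Nat) : Nat :=
  if n = 0 then 0 else (if 5 ≤ n % 10 then 1 else 0) + pvCnt5 (n / 10)
decreasing_by exact Nat.div_lt_self (Nat.pos_of_ne_zero (by assumption)) (by norm_num)

def pvVsum (n : Nat) : Int := (pvDsum n : Int) - 9 * pvCnt5 n

def pvValN (d : Nat) : Int := (d : Int) - (if 5 ≤ d then 9 else 0)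

-- number of n < m with pvVsum n = t
def pvCC (m : Nat) (t : Int) : Nat :=
  ((List.range m).filter (fun n => pvVsum n = t)).length

-- the loop body of count_happy_numbers_alt (its `let v := …` zeta-reduced)
def pvStepFun (st : Int × PySem.Dict Int Int) (_x : Int) : Int × PySem.Dict Int Int :=
  (st.2.getD 0 0,
    st.2.items.foldl
      (fun ndp tc =>
        (PySem.List.pyRange 0 10).foldl
          (fun ndp d =>
            ndp.insert (tc.1 + (if d < 5 then d else d - 9))
              (ndp.getD (tc.1 + (if d < 5 then d else d - 9)) 0 + tc.2))
          ndp)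
      PySem.Dict.empty)

def pvInit : Int × PySem.Dict Int Int :=
  ((PySem.Dict.ofList [((0 : Int), (1 : Int))]).getD 0 0,
    PySem.Dict.ofList [((0 : Int), (1 : Int))])

theorem pv_alt_eq (length : Int) :
    count_happy_numbers_alt length
      = if PySem.Int.mod length 2 ≠ 0 then 0
        else
          ((PySem.List.pyRange 0 (PySem.Int.floordiv length 2)).foldl pvStepFun pvInit).2.getD 0 0
            - ((PySem.List.pyRange 0 (PySem.Int.floordiv length 2)).foldl pvStepFun pvInit).1 :=
  rfl

def pvInv (j : Nat) (dp : PySem.Dict Int Int) : Prop :=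
  dp.keys.Nodup ∧ ∀ t : Int, dp.getD t 0 = (pvCC (10 ^ j) t : Int)

theorem pv_digitChar_val (d : Nat) (h : d < 10) :
    ((Nat.digitChar d).toNat : Int) - 48 = d := by
  interval_cases d <;> decide

theorem pv_toDigitsCore_sum (f : Nat) : ∀ (n : Nat) (acc : List Char), n < f →
    ((Nat.toDigitsCore 10 f n acc).map (fun c => (c.toNat : Int) - 48)).sum
      = (pvDsum n : Int) + (acc.map (fun c => (c.toNat : Int) - 48)).sum := by
  induction f with
  | zero => intro n acc h; omega
  | succ f ih =>
    intro n acc h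
    rw [Nat.toDigitsCore]
    by_cases h10 : n / 10 = 0
    · rw [if_pos h10]
      rw [List.map_cons, List.sum_cons, pv_digitChar_val (n % 10) (Nat.mod_lt n (by omega))]
      have hd : pvDsum n = n % 10 := by
        by_cases h0 : n = 0
        · subst h0; simp [pvDsum]
        · rw [pvDsum, if_neg h0, h10]; simp [pvDsum]
      rw [hd]
    · rw [if_neg h10]
      have hlt : n / 10 < f := by omega
      rw [ih (n / 10) _ hlt, List.map_cons, List.sum_cons,
        pv_digitChar_val (n % 10) (Nat.mod_lt n (by omega))]
      have h0 : n ≠ 0 := by omega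
      conv_rhs => rw [pvDsum, if_neg h0]
      push_cast
      ring

theorem pv_digitSumStr_eq (n : Nat) : pvDigitSumStr (n : Int) = (pvDsum n : Int) := by
  unfold pvDigitSumStr
  rw [PySem.Int.toList_toStr]
  unfold PySem.Int.toChars
  rw [if_neg (by omega : ¬ ((n : Int) < 0)), Int.toNat_natCast]
  unfold Nat.toDigits
  rw [pv_toDigitsCore_sum (n + 1) n [] (by omega)]
  simp

theorem pv_dsum_two_succ (q : Nat) : pvDsum (2 * q + 1) = pvDsum (2 * q) + 1 := by
  by_cases h0 : q = 0
  · subst h0; simp [pvDsum]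
  · have h1 : (2 * q + 1) % 10 = 2 * q % 10 + 1 := by omega
    have h2 : (2 * q + 1) / 10 = 2 * q / 10 := by omega
    rw [pvDsum, if_neg (by omega : ¬ (2 * q + 1 = 0))]
    conv_rhs => rw [pvDsum, if_neg (by omega : ¬ (2 * q = 0))]
    rw [h1, h2]
    omega

theorem pv_carry (n : Nat) : (pvDsum (2 * n) : Int) = 2 * pvDsum n - 9 * pvCnt5 n := by
  induction n using Nat.strong_induction_on with
  | _ n ih =>
    by_cases h0 : n = 0
    · subst h0; simp [pvDsum, pvCnt5]
    · have hlt : n / 10 < n := Nat.div_lt_self (Nat.pos_of_ne_zero h0) (by norm_num)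
      have ihq := ih (n / 10) hlt
      have hdn : pvDsum n = n % 10 + pvDsum (n / 10) := by rw [pvDsum, if_neg h0]
      have hcn : pvCnt5 n = (if 5 ≤ n % 10 then 1 else 0) + pvCnt5 (n / 10) := by
        rw [pvCnt5, if_neg h0]
      by_cases hr : n % 10 < 5
      · have hdsum : pvDsum (2 * n) = 2 * (n % 10) + pvDsum (2 * (n / 10)) := by
          rw [pvDsum, if_neg (by omega : ¬ (2 * n = 0)),
            (by omega : (2 * n) % 10 = 2 * (n % 10)), (by omega : (2 * n) / 10 = 2 * (n / 10))]
        rw [hdsum, hdn, hcn, if_neg (by omega : ¬ (5 ≤ n % 10))]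
        push_cast
        omega
      · have hdsum : pvDsum (2 * n) = (2 * (n % 10) - 10) + (pvDsum (2 * (n / 10)) + 1) := by
          rw [pvDsum, if_neg (by omega : ¬ (2 * n = 0)),
            (by omega : (2 * n) % 10 = 2 * (n % 10) - 10),
            (by omega : (2 * n) / 10 = 2 * (n / 10) + 1), pv_dsum_two_succ]
        rw [hdsum, hdn, hcn, if_pos (by omega : 5 ≤ n % 10)]
        push_cast [Nat.cast_sub (by omega : 10 ≤ 2 * (n % 10))]
        omega

theorem pv_cond_iff (n : Nat) : (pvDsum n = pvDsum (2 * n)) ↔ pvVsum n = 0 := by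
  have h := pv_carry n
  unfold pvVsum
  omega

theorem pv_vsum_split (q d : Nat) (h : d < 10) :
    pvVsum (10 * q + d) = pvVsum q + pvValN d := by
  unfold pvVsum pvValN
  by_cases h0 : 10 * q + d = 0
  · have hq : q = 0 := by omega
    have hd : d = 0 := by omega
    subst hq; subst hd; simp [pvDsum, pvCnt5]
  · have h1 : pvDsum (10 * q + d) = d + pvDsum q := by
      rw [pvDsum, if_neg h0, (by omega : (10 * q + d) % 10 = d),
        (by omega : (10 * q + d) / 10 = q)]
    have h2 : pvCnt5 (10 * q + d) = (if 5 ≤ d then 1 else 0) + pvCnt5 q := by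
      rw [pvCnt5, if_neg h0, (by omega : (10 * q + d) % 10 = d),
        (by omega : (10 * q + d) / 10 = q)]
    rw [h1, h2]
    split_ifs <;> push_cast <;> ring

theorem pv_vsum_zero : pvVsum 0 = 0 := by simp [pvVsum, pvDsum, pvCnt5]

theorem pv_CC_step (m : Nat) (t : Int) :
    pvCC (m + 1) t = pvCC m t + (if pvVsum m = t then 1 else 0) := by
  unfold pvCC
  rw [List.range_succ, List.filter_append, List.length_append]
  by_cases h : pvVsum m = t <;> simp [List.filter, h]

theorem pv_CC_one (t : Int) : pvCC 1 t = if (0 : Int) = t then 1 else 0 := by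
  have h := pv_CC_step 0 t
  rw [pv_vsum_zero] at h
  simpa [pvCC] using h

theorem pv_countP_range_eq_sum (n : Nat) (p : Nat → Bool) :
    (List.range n).countP p = ∑ d ∈ Finset.range n, (if p d then 1 else 0) := by
  induction n with
  | zero => simp
  | succ n ih =>
    rw [List.range_succ, List.countP_append, Finset.sum_range_succ, ih,
      List.countP_cons, List.countP_nil]
    omega

theorem pv_CC_block (m : Nat) (t : Int) : ∀ (j : Nat),
    pvCC (10 * m + j) t = pvCC (10 * m) t
      + (List.range j).countP (fun d => pvVsum (10 * m + d) = t) := by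
  intro j
  induction j with
  | zero => simp
  | succ j ih =>
    rw [show 10 * m + (j + 1) = (10 * m + j) + 1 by ring, pv_CC_step, ih,
      List.range_succ, List.countP_append, List.countP_cons, List.countP_nil]
    by_cases h : pvVsum (10 * m + j) = t
    · simp only [h, decide_true, if_pos]
      omega
    · simp only [h, decide_false, Bool.false_eq_true]
      omega

theorem pv_CC_mul (m : Nat) (t : Int) :
    pvCC (10 * m) t = ∑ d ∈ Finset.range 10, pvCC m (t - pvValN d) := by
  induction m generalizing t with
  | zero => simp [pvCC]
  | succ m ih =>
    have hL : pvCC (10 * (m + 1)) t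
        = pvCC (10 * m) t + (List.range 10).countP (fun d => pvVsum (10 * m + d) = t) := by
      rw [show 10 * (m + 1) = 10 * m + 10 by ring]
      exact pv_CC_block m t 10
    rw [hL, ih]
    have hR : ∀ d ∈ Finset.range 10,
        pvCC (m + 1) (t - pvValN d)
          = pvCC m (t - pvValN d) + (if pvVsum m = t - pvValN d then 1 else 0) :=
      fun d _ => pv_CC_step m (t - pvValN d)
    rw [Finset.sum_congr rfl hR, Finset.sum_add_distrib]
    have hc : (List.range 10).countP (fun d => pvVsum (10 * m + d) = t)
        = ∑ d ∈ Finset.range 10, (if pvVsum m = t - pvValN d then 1 else 0) := by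
      rw [pv_countP_range_eq_sum]
      refine Finset.sum_congr rfl ?_
      intro d hd
      have hd10 : d < 10 := Finset.mem_range.mp hd
      have hsp := pv_vsum_split m d hd10
      simp only [hsp, decide_eq_true_eq]
      by_cases hcase : pvVsum m = t - pvValN d
      · rw [if_pos (by omega), if_pos hcase]
      · rw [if_neg (by omega), if_neg hcase]
    omega

-- ===== dict-DP side =====

theorem pv_fold_insert_getD (key : Int → Int) (c : Int) : ∀ (l : List Int)
    (d : PySem.Dict Int Int) (s : Int),
    (l.foldl (fun nd x => nd.insert (key x) (nd.getD (key x) 0 + c)) d).getD s 0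
      = d.getD s 0 + c * (l.countP (fun x => key x = s)) := by
  intro l
  induction l with
  | nil => intro d s; simp
  | cons x xs ih =>
    intro d s
    rw [List.foldl_cons, ih, List.countP_cons, PySem.Dict.getD_insert]
    by_cases hx : key x = s
    · rw [if_pos hx.symm, if_pos (by simpa using hx), hx]
      push_cast
      ring
    · rw [if_neg (fun hh => hx hh.symm), if_neg (by simpa using hx)]
      push_cast
      ring

def pvCnt10 (t s : Int) : Int :=
  ((PySem.List.pyRange 0 10).countP (fun x => t + (if x < 5 then x else x - 9) = s) : Int)

theorem pv_fold_items : ∀ (items : List (Int × Int)) (d : PySem.Dict Int Int) (s : Int),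
    (items.foldl
        (fun ndp tc =>
          (PySem.List.pyRange 0 10).foldl
            (fun ndp d =>
              ndp.insert (tc.1 + (if d < 5 then d else d - 9))
                (ndp.getD (tc.1 + (if d < 5 then d else d - 9)) 0 + tc.2))
            ndp)
        d).getD s 0
      = d.getD s 0 + (items.map (fun tc => tc.2 * pvCnt10 tc.1 s)).sum := by
  intro items
  induction items with
  | nil => intro d s; simp
  | cons tc rest ih =>
    intro d s
    rw [List.foldl_cons, ih, List.map_cons, List.sum_cons,
      pv_fold_insert_getD (fun x => tc.1 + (if x < 5 then x else x - 9)) tc.2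
        (PySem.List.pyRange 0 10) d s]
    unfold pvCnt10
    ring

theorem pv_nodup_fold : ∀ (l : List (Int × Int)) (d : PySem.Dict Int Int), d.keys.Nodup →
    (l.foldl
        (fun ndp tc =>
          (PySem.List.pyRange 0 10).foldl
            (fun ndp d =>
              ndp.insert (tc.1 + (if d < 5 then d else d - 9))
                (ndp.getD (tc.1 + (if d < 5 then d else d - 9)) 0 + tc.2))
            ndp)
        d).keys.Nodup := by
  intro l
  induction l with
  | nil => intro d h; exact h
  | cons tc rest ih =>
    intro d h
    rw [List.foldl_cons]
    exact ih _ (PySem.Dict.nodup_keys_foldl_insert_key _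
      (fun x => tc.1 + (if x < 5 then x else x - 9))
      (fun nd x => nd.getD (tc.1 + (if x < 5 then x else x - 9)) 0 + tc.2) d h)

-- pvCnt10 over the Int range [0,10) is the Nat-range count of t + pvValN d = s
theorem pv_cnt10_eq (t s : Int) :
    pvCnt10 t s = ((List.range 10).countP (fun d => t + pvValN d = s) : Int) := by
  unfold pvCnt10
  rw [show (10 : Int) = ((10 : Nat) : Int) by norm_num, PySem.List.pyRange_zero_natCast,
    List.countP_map]
  have hcong : List.countP
        ((fun x => decide ((t + if x < 5 then x else x - 9) = s)) ∘ fun k : Nat => ((k : Nat) : Int))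
        (List.range 10)
      = List.countP (fun d : Nat => decide (t + pvValN d = s)) (List.range 10) := by
    refine List.countP_congr ?_
    intro d hd
    have hd10 : d < 10 := List.mem_range.mp hd
    simp only [Function.comp_apply, decide_eq_true_eq, pvValN]
    split_ifs <;> omega
  rw [hcong]

theorem pv_inv_step (j : Nat) (dp : PySem.Dict Int Int) (h : pvInv j dp) :
    pvInv (j + 1)
      (dp.items.foldl
        (fun ndp tc =>
          (PySem.List.pyRange 0 10).foldl
            (fun ndp d =>
              ndp.insert (tc.1 + (if d < 5 then d else d - 9))
                (ndp.getD (tc.1 + (if d < 5 then d else d - 9)) 0 + tc.2))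
            ndp)
        PySem.Dict.empty) := by
  obtain ⟨hnd, hval⟩ := h
  refine ⟨pv_nodup_fold dp.items PySem.Dict.empty (by simp [pysem]), ?_⟩
  intro s
  rw [pv_fold_items dp.items PySem.Dict.empty s, PySem.Dict.getD_empty, zero_add,
    PySem.Dict.items_eq_map_keys dp hnd 0, List.map_map]
  have hk0 : ∀ t : Int, t ∉ dp.keys.toFinset → (pvCC (10 ^ j) t : Int) = 0 := by
    intro t ht
    rw [← hval t]
    refine PySem.Dict.getD_of_not_contains dp 0 ?_
    rw [← Bool.not_eq_true, PySem.Dict.contains_iff_mem_keys]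
    simpa using ht
  have hmap : (dp.keys.map ((fun tc : Int × Int => tc.2 * pvCnt10 tc.1 s)
        ∘ fun k => (k, dp.getD k 0))).sum
      = ∑ t ∈ dp.keys.toFinset, (pvCC (10 ^ j) t : Int) * pvCnt10 t s := by
    rw [List.sum_toFinset _ hnd]
    refine congrArg List.sum (List.map_congr_left ?_)
    intro t ht
    simp [Function.comp, hval t]
  rw [hmap]
  have hswap : ∀ t : Int, (pvCC (10 ^ j) t : Int) * pvCnt10 t s
      = ∑ d ∈ Finset.range 10, (if t = s - pvValN d then (pvCC (10 ^ j) t : Int) else 0) := by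
    intro t
    rw [pv_cnt10_eq, pv_countP_range_eq_sum]
    push_cast
    rw [Finset.mul_sum]
    refine Finset.sum_congr rfl ?_
    intro d _
    by_cases hc : t + pvValN d = s
    · rw [if_pos (by simpa using hc), if_pos (by omega)]
      ring
    · rw [if_neg (by simpa using hc), if_neg (by omega)]
      ring
  rw [Finset.sum_congr rfl (fun t _ => hswap t), Finset.sum_comm]
  have hinner : ∀ d : Int, ∑ t ∈ dp.keys.toFinset,
        (if t = s - d then (pvCC (10 ^ j) t : Int) else 0)
      = (pvCC (10 ^ j) (s - d) : Int) := by
    intro d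
    rw [Finset.sum_ite_eq' dp.keys.toFinset (s - d) (fun t => (pvCC (10 ^ j) t : Int))]
    by_cases hmem : s - d ∈ dp.keys.toFinset
    · rw [if_pos hmem]
    · rw [if_neg hmem, hk0 _ hmem]
  rw [Finset.sum_congr rfl (fun d _ => hinner (pvValN d)),
    pow_succ, mul_comm ((10 : Nat) ^ j) 10, pv_CC_mul (10 ^ j) s]
  push_cast
  rfl

theorem pv_inv_init : pvInv 0 pvInit.2 := by
  have hof : pvInit.2 = PySem.Dict.empty.insert 0 1 := by decide
  constructor
  · rw [hof]; decide
  · intro t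
    rw [hof, PySem.Dict.getD_insert, pow_zero, pv_CC_one]
    by_cases h : t = 0
    · rw [if_pos h, if_pos h.symm]
      norm_num
    · rw [if_neg h, if_neg (fun hh => h hh.symm), PySem.Dict.getD_empty]
      norm_num

theorem pv_loop (j : Nat) :
    pvInv j ((PySem.List.pyRange 0 ((j : Nat) : Int)).foldl pvStepFun pvInit).2
    ∧ ((PySem.List.pyRange 0 ((j : Nat) : Int)).foldl pvStepFun pvInit).1
      = (pvCC (10 ^ (j - 1)) 0 : Int) := by
  induction j with
  | zero =>
    have hnil : PySem.List.pyRange 0 (((0 : Nat)) : Int) = [] := by decide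
    rw [hnil, List.foldl_nil]
    refine ⟨pv_inv_init, ?_⟩
    have h1 : pvInit.1 = 1 := by decide
    rw [h1, pow_zero, pv_CC_one]
    norm_num
  | succ j ih =>
    have hsplit : PySem.List.pyRange 0 (((j + 1 : Nat)) : Int)
        = PySem.List.pyRange 0 ((j : Nat) : Int) ++ [((j : Nat) : Int)] := by
      rw [show (((j + 1 : Nat)) : Int) = ((j : Nat) : Int) + 1 by push_cast; ring]
      exact PySem.List.pyRange_one_succ_right (by positivity)
    rw [hsplit, List.foldl_append, List.foldl_cons, List.foldl_nil]
    obtain ⟨hinv, _⟩ := ih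
    refine ⟨pv_inv_step j _ hinv, ?_⟩
    show _ = (pvCC (10 ^ (j + 1 - 1)) 0 : Int)
    rw [Nat.add_sub_cancel]
    exact hinv.2 0

-- A's per-number test is `pvVsum n = 0`
theorem pv_test_eq (n : Nat) :
    (pvDigitSumStr ((n : Nat) : Int) == pvDigitSumStr (((n : Nat) : Int) * 2))
      = decide (pvVsum n = 0) := by
  have h2 : (((n : Nat) : Int) * 2) = ((2 * n : Nat) : Int) := by push_cast; ring
  rw [h2, pv_digitSumStr_eq, pv_digitSumStr_eq]
  by_cases h : pvVsum n = 0
  · have hd := (pv_cond_iff n).mpr h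
    simp [hd, h]
  · have hd : pvDsum n ≠ pvDsum (2 * n) := fun hh => h ((pv_cond_iff n).mp hh)
    simp only [h, decide_false]
    rw [beq_eq_false_iff_ne]
    exact fun hh => hd (by exact_mod_cast hh)

theorem pv_segment_count (a b : Nat) (hab : a ≤ b) :
    (PySem.List.pyRange ((a : Nat) : Int) ((b : Nat) : Int)).countP
        (fun num => pvDigitSumStr num == pvDigitSumStr (num * 2))
      + pvCC a 0 = pvCC b 0 := by
  induction b, hab using Nat.le_induction with
  | base =>
    have hnil : PySem.List.pyRange ((a : Nat) : Int) ((a : Nat) : Int) = [] := by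
      refine List.eq_nil_iff_forall_not_mem.mpr ?_
      intro x hx
      have := (PySem.List.mem_pyRange_one).mp hx
      omega
    rw [hnil]
    simp
  | succ b hab ih =>
    have hsplit : PySem.List.pyRange ((a : Nat) : Int) (((b + 1 : Nat)) : Int)
        = PySem.List.pyRange ((a : Nat) : Int) ((b : Nat) : Int) ++ [((b : Nat) : Int)] := by
      rw [show (((b + 1 : Nat)) : Int) = ((b : Nat) : Int) + 1 by push_cast; ring]
      exact PySem.List.pyRange_one_succ_right (by exact_mod_cast hab)
    rw [hsplit, List.countP_append, pv_CC_step, List.countP_cons, List.countP_nil,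
      pv_test_eq b]
    simp only [decide_eq_true_eq]
    by_cases h : pvVsum b = 0
    · simp only [if_pos h]
      omega
    · simp only [if_neg h]
      omega

-- ===== VERDICT (by name: the statement is the Claim_ definition above) =====
theorem count_happy_numbers_spec : Claim_equal_count_happy_numbers := by
  unfold Claim_equal_count_happy_numbers
  intro length _ hPre
  unfold Spec_count_happy_numbers
  rw [pv_alt_eq]
  unfold count_happy_numbers
  by_cases hmod : PySem.Int.mod length 2 ≠ 0
  · rw [if_pos hmod, if_pos hmod]
  · rw [if_neg hmod, if_neg hmod]
    have hmod0 : PySem.Int.mod length 2 = 0 := not_not.mp hmod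
    have hlen : 2 ≤ length := by
      rcases hPre with h | h
      · exact absurd hmod0 h
      · exact h
    have hk1 : 1 ≤ PySem.Int.floordiv length 2 := by
      rw [PySem.Int.floordiv_eq_ediv_of_pos (by norm_num)]
      omega
    set kZ := PySem.Int.floordiv length 2 with hkZ
    set kN := kZ.toNat with hkN
    have hkZN : kZ = ((kN : Nat) : Int) := by omega
    have hkN1 : 1 ≤ kN := by omega
    rw [hkZN]
    have hexp : ((((kN : Nat) : Int)) - 1).toNat = kN - 1 := by omega
    have hA : (10 : Int) ^ ((((kN : Nat) : Int)) - 1).toNat = (((10 ^ (kN - 1) : Nat)) : Int) := by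
      rw [hexp]; push_cast; ring
    have hB : (10 : Int) ^ kN = (((10 ^ kN : Nat)) : Int) := by
      push_cast; ring
    rw [hA, hB, PySem.List.foldl_count_if
      (fun num => pvDigitSumStr num == pvDigitSumStr (num * 2)) _ 0]
    have hseg := pv_segment_count (10 ^ (kN - 1)) (10 ^ kN)
      (Nat.pow_le_pow_right (by norm_num) (by omega))
    have hloop := pv_loop kN
    rw [(hloop.1).2 0, hloop.2]
    push_cast at hseg ⊢
    omega
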